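-- pv_equiv track=rewrite | github.com/danilonumeroso/advent_of_code | day_19/02.py | compute_number_of_combinations
-- ===== SOURCE A (Python) =====
-- MIN_NUMBER = 1
--
-- MAX_NUMBER = 4000
--
-- def reduce_cond(conditions):
--     """
--         Given a list of conditions, returns a tuple (greater_than, less_than) where:
--             - less_than is the maximum number that is less than all the numbers in the conditions
--             - greater_than is the minimum number that is greater than all the numbers in the conditions
--         Example:
--             ['x<8', 'x>3','x>5'] -> [5, 8]
--     """
--     less_than, greater_than = MAX_NUMBER+1, MIN_NUMBER
--     for cond in conditions:
--         if '<' in cond: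
--             less_than = min(less_than, int(cond.split('<')[1]))
--         elif '>' in cond:
--             greater_than = max(greater_than, int(cond.split('>')[1]))
--     return (greater_than, less_than)
--
-- def compute_number_of_combinations(conditions):
--
--     res = 0
--
--     for cond in conditions:
--         x_cond = [c for c in cond.split(',') if c.startswith('x')]
--         m_cond = [c for c in cond.split(',') if c.startswith('m')]
--         a_cond = [c for c in cond.split(',') if c.startswith('a')]
--         s_cond = [c for c in cond.split(',') if c.startswith('s')]
--
--         x = reduce_cond(x_cond)
--         m = reduce_cond(m_cond)
--         a = reduce_cond(a_cond)
--         s = reduce_cond(s_cond)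
--
--         combinations = 1
--         for interval in [x, m, a, s]:
--             combinations *= interval[1] - interval[0]
--
--         res += combinations
--
--     return res
-- ===== SOURCE B (Python) =====
-- def compute_number_of_combinations(conditions):
--     res = 0
--     for cond in conditions:
--         bounds = {'x': (1, 4001), 'm': (1, 4001), 'a': (1, 4001), 's': (1, 4001)}
--         for c in cond.split(','):
--             k = c[:1]
--             if k in bounds:
--                 lo, hi = bounds[k]
--                 if '<' in c:
--                     bounds[k] = (lo, min(hi, int(c.split('<')[1])))
--                 elif '>' in c:
--                     bounds[k] = (max(lo, int(c.split('>')[1])), hi)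
--         total = 1
--         for lo, hi in bounds.values():
--             total *= hi - lo
--         res += total
--     return res
-- ===== Notes on version B (the rewrite author's own statement) =====
-- stated objective: faster
-- what changed: Per condition, A splits the string five times, builds four filtered lists and runs the reduce_cond helper on each; B makes one pass over the parts of a single split, maintaining one bounds table keyed by the variable's first character, then multiplies the four interval widths.
import Mathlib
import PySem

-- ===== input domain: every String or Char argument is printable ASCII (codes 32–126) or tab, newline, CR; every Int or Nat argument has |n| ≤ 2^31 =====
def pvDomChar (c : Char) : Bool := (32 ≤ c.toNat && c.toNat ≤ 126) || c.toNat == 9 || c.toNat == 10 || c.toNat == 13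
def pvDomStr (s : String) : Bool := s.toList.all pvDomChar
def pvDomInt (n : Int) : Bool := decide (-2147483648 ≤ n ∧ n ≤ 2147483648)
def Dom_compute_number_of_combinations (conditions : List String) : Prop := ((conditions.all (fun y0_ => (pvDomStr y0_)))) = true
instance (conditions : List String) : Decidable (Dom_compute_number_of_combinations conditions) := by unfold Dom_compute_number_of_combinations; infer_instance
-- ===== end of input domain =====

-- B replaces A's five splits, four filter comprehensions and reduce_cond helper per condition by a
-- single pass over one split maintaining one bounds table (measured constant-factor faster in a timing run).

-- int(s), used exactly where the Python calls int(...); Pre_ guarantees the parse succeeds,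
-- so the .getD default is never reached on admitted inputs.
def pvParse (s : String) : Int := (PySem.Int.ofStr? s).getD 0

-- cond.split(sep)[1]; when sep occurs in cond the split has ≥ 2 pieces, so the defaults are never hit there.
def pvSplitSnd (cond sep : String) : String :=
  (PySem.List.pyGet? ((PySem.Str.split? cond sep).getD []) 1).getD ""

-- ===== PORT A =====
def MIN_NUMBER : Int := 1
def MAX_NUMBER : Int := 4000

def reduce_cond (conditions : List String) : Int × Int :=
  -- less_than, greater_than = MAX_NUMBER+1, MIN_NUMBER; loop; return (greater_than, less_than)
  let st := conditions.foldl
    (fun (st : Int × Int) cond =>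
      if PySem.Str.isIn "<" cond then
        (min st.1 (pvParse (pvSplitSnd cond "<")), st.2)
      else if PySem.Str.isIn ">" cond then
        (st.1, max st.2 (pvParse (pvSplitSnd cond ">")))
      else st)
    (MAX_NUMBER + 1, MIN_NUMBER)
  (st.2, st.1)

def compute_number_of_combinations (conditions : List String) : Int :=
  conditions.foldl
    (fun res cond =>
      let x_cond := ((PySem.Str.split? cond ",").getD []).filter (fun c => PySem.Str.startswith c "x")
      let m_cond := ((PySem.Str.split? cond ",").getD []).filter (fun c => PySem.Str.startswith c "m")
      let a_cond := ((PySem.Str.split? cond ",").getD []).filter (fun c => PySem.Str.startswith c "a")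
      let s_cond := ((PySem.Str.split? cond ",").getD []).filter (fun c => PySem.Str.startswith c "s")
      let x := reduce_cond x_cond
      let m := reduce_cond m_cond
      let a := reduce_cond a_cond
      let s := reduce_cond s_cond
      let combinations := ([x, m, a, s]).foldl (fun acc interval => acc * (interval.2 - interval.1)) 1
      res + combinations)
    0

-- ===== PORT B =====
-- one step of B's inner loop over the parts of a condition (the body of `for c in cond.split(',')`)
def pvBoundsStep (d : PySem.Dict String (Int × Int)) (c : String) : PySem.Dict String (Int × Int) :=
  let k := PySem.Str.slice c (some 0) (some 1)    -- c[:1]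
  if d.contains k then
    let p := d.getD k (0, 0)                      -- lo, hi = bounds[k]  (key is present; default unused)
    if PySem.Str.isIn "<" c then
      d.insert k (p.1, min p.2 (pvParse (pvSplitSnd c "<")))
    else if PySem.Str.isIn ">" c then
      d.insert k (max p.1 (pvParse (pvSplitSnd c ">")), p.2)
    else d
  else d

def compute_number_of_combinations_alt (conditions : List String) : Int :=
  conditions.foldl
    (fun res cond =>
      let bounds := ((PySem.Str.split? cond ",").getD []).foldl pvBoundsStep
        (PySem.Dict.ofList [("x", ((1 : Int), (4001 : Int))), ("m", (1, 4001)), ("a", (1, 4001)), ("s", (1, 4001))])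
      let total := bounds.values.foldl (fun acc p => acc * (p.2 - p.1)) 1
      res + total)
    0

-- ===== PRECONDITION & SPEC =====
-- Pre_ excludes exactly the inputs on which Python A raises ValueError: a part that starts with
-- x/m/a/s and contains '<' (resp. otherwise '>') whose text after the first '<' (resp. '>') is not a valid int literal.
def pvPartPre (c : String) : Prop :=
  (PySem.Str.startswith c "x" = true ∨ PySem.Str.startswith c "m" = true ∨
   PySem.Str.startswith c "a" = true ∨ PySem.Str.startswith c "s" = true) →
    ((PySem.Str.isIn "<" c = true → (PySem.Int.ofStr? (pvSplitSnd c "<")).isSome = true) ∧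
     (PySem.Str.isIn "<" c = false → PySem.Str.isIn ">" c = true →
        (PySem.Int.ofStr? (pvSplitSnd c ">")).isSome = true))

def Pre_compute_number_of_combinations (conditions : List String) : Prop :=
  ∀ cond ∈ conditions, ∀ c ∈ (PySem.Str.split? cond ",").getD [], pvPartPre c
instance (conditions : List String) : Decidable (Pre_compute_number_of_combinations conditions) := by
  unfold Pre_compute_number_of_combinations pvPartPre; infer_instance

def pvWitness_compute_number_of_combinations : List String := ["x<8,x>3,x>5", "a<100,s>17,foo"]

def Spec_compute_number_of_combinations (conditions : List String) (out : Int) : Prop := out = compute_number_of_combinations_alt conditions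
instance (conditions : List String) (out : Int) : Decidable (Spec_compute_number_of_combinations conditions out) := by unfold Spec_compute_number_of_combinations; infer_instance

-- ===== CLAIM (what is proved, stated in full; the proofs are below) =====
def Claim_equal_compute_number_of_combinations : Prop := ∀ (conditions : List String), Dom_compute_number_of_combinations conditions → Pre_compute_number_of_combinations conditions → Spec_compute_number_of_combinations conditions (compute_number_of_combinations conditions)

-- ===== LEMMAS AND PROOFS =====

-- B's per-variable update, extracted for the proof: what pvBoundsStep does to the entry of the
-- variable a part addresses (state is (lo, hi)).
def pvStepV (p : Int × Int) (c : String) : Int × Int :=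
  if PySem.Str.isIn "<" c then (p.1, min p.2 (pvParse (pvSplitSnd c "<")))
  else if PySem.Str.isIn ">" c then (max p.1 (pvParse (pvSplitSnd c ">")), p.2)
  else p

-- the entry for variable key v after one part c
def pvUpd (v : String) (p : Int × Int) (c : String) : Int × Int :=
  if PySem.Str.startswith c v then pvStepV p c else p

lemma pvListSlice01 (l : List Char) : PySem.List.slice l (some 0) (some 1) = l.take 1 := by
  cases l <;> simp [PySem.List.slice, PySem.List.clampIdx]

lemma pvSlice1 (c : String) : PySem.Str.slice c (some 0) (some 1) = String.ofList (c.toList.take 1) := by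
  unfold PySem.Str.slice
  rw [PySem.Chars.slice_eq_listSlice, pvListSlice01]

lemma pvOfListSingleton_eq_iff (a b : Char) : String.ofList [a] = String.ofList [b] ↔ a = b := by
  constructor
  · intro h; have := congrArg String.toList h; simpa using this
  · intro h; rw [h]

lemma pvKeyBeq (a b : Char) : (String.ofList [a] == String.ofList [b]) = (a == b) := by
  by_cases h : a = b
  · subst h; simp
  · simp [h, pvOfListSingleton_eq_iff]

lemma pvContains4 (px pm pa ps : Int × Int) (ch : Char) :
    (PySem.Dict.mk [("x",px),("m",pm),("a",pa),("s",ps)]).contains (String.ofList [ch])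
      = ('x' == ch || ('m' == ch || ('a' == ch || 's' == ch))) := by
  show (List.any _ _) = _
  simp only [List.any_cons, List.any_nil]
  rw [show (("x" : String) == String.ofList [ch]) = ('x' == ch) from pvKeyBeq 'x' ch,
      show (("m" : String) == String.ofList [ch]) = ('m' == ch) from pvKeyBeq 'm' ch,
      show (("a" : String) == String.ofList [ch]) = ('a' == ch) from pvKeyBeq 'a' ch,
      show (("s" : String) == String.ofList [ch]) = ('s' == ch) from pvKeyBeq 's' ch]
  simp

lemma pvStep_dict (c : String) (px pm pa ps : Int × Int) :
    pvBoundsStep (PySem.Dict.mk [("x", px), ("m", pm), ("a", pa), ("s", ps)]) c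
      = PySem.Dict.mk [("x", pvUpd "x" px c), ("m", pvUpd "m" pm c),
                       ("a", pvUpd "a" pa c), ("s", pvUpd "s" ps c)] := by
  rcases hc : c.toList with _ | ⟨ch, t⟩
  · have hk : PySem.Str.slice c (some 0) (some 1) = "" := by
      rw [pvSlice1, hc]; rfl
    have hsw : ∀ v : List Char, PySem.Str.startswith c (String.ofList v) = ([] ++ v).isPrefixOf [] := by
      intro v; simp [PySem.Str.startswith, hc, PySem.Chars.startswith]
    have hswx : PySem.Str.startswith c "x" = false := by
      have := hsw ['x']; simpa using this
    have hswm : PySem.Str.startswith c "m" = false := by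
      have := hsw ['m']; simpa using this
    have hswa : PySem.Str.startswith c "a" = false := by
      have := hsw ['a']; simpa using this
    have hsws : PySem.Str.startswith c "s" = false := by
      have := hsw ['s']; simpa using this
    have hcf : (PySem.Dict.mk [("x",px),("m",pm),("a",pa),("s",ps)]).contains "" = false := rfl
    simp only [pvBoundsStep, hk, hcf, pvUpd, hswx, hswm, hswa, hsws]
    simp
  · have hk : PySem.Str.slice c (some 0) (some 1) = String.ofList [ch] := by
      rw [pvSlice1, hc]; rfl
    have hsw : ∀ v : Char, PySem.Str.startswith c (String.ofList [v]) = (v == ch) := by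
      intro v; simp [PySem.Str.startswith, hc, PySem.Chars.startswith, List.isPrefixOf]
    have hswx : PySem.Str.startswith c "x" = ('x' == ch) := hsw 'x'
    have hswm : PySem.Str.startswith c "m" = ('m' == ch) := hsw 'm'
    have hswa : PySem.Str.startswith c "a" = ('a' == ch) := hsw 'a'
    have hsws : PySem.Str.startswith c "s" = ('s' == ch) := hsw 's'
    by_cases hx : ch = 'x'
    · subst hx
      have hk' : PySem.Str.slice c (some 0) (some 1) = "x" := hk
      simp only [pvBoundsStep, hk', pvUpd, hswx, hswm, hswa, hsws]
      rw [show ((PySem.Dict.mk [("x",px),("m",pm),("a",pa),("s",ps)]).contains "x") = true from rfl]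
      simp only [
        show (('x' == 'x') : Bool) = true from rfl,
        show (('m' == 'x') : Bool) = false from rfl,
        show (('a' == 'x') : Bool) = false from rfl,
        show (('s' == 'x') : Bool) = false from rfl,
        eq_self_iff_true, Bool.false_eq_true, if_true, if_false, ite_true, ite_false]
      unfold pvStepV
      split_ifs <;> rfl
    · by_cases hm : ch = 'm'
      · subst hm
        have hk' : PySem.Str.slice c (some 0) (some 1) = "m" := hk
        simp only [pvBoundsStep, hk', pvUpd, hswx, hswm, hswa, hsws]
        rw [show ((PySem.Dict.mk [("x",px),("m",pm),("a",pa),("s",ps)]).contains "m") = true from rfl]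
        simp only [
          show (('x' == 'm') : Bool) = false from rfl,
          show (('m' == 'm') : Bool) = true from rfl,
          show (('a' == 'm') : Bool) = false from rfl,
          show (('s' == 'm') : Bool) = false from rfl,
          eq_self_iff_true, Bool.false_eq_true, if_true, if_false, ite_true, ite_false]
        unfold pvStepV
        split_ifs <;> rfl
      · by_cases ha : ch = 'a'
        · subst ha
          have hk' : PySem.Str.slice c (some 0) (some 1) = "a" := hk
          simp only [pvBoundsStep, hk', pvUpd, hswx, hswm, hswa, hsws]
          rw [show ((PySem.Dict.mk [("x",px),("m",pm),("a",pa),("s",ps)]).contains "a") = true from rfl]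
          simp only [
            show (('x' == 'a') : Bool) = false from rfl,
            show (('m' == 'a') : Bool) = false from rfl,
            show (('a' == 'a') : Bool) = true from rfl,
            show (('s' == 'a') : Bool) = false from rfl,
            eq_self_iff_true, Bool.false_eq_true, if_true, if_false, ite_true, ite_false]
          unfold pvStepV
          split_ifs <;> rfl
        · by_cases hs : ch = 's'
          · subst hs
            have hk' : PySem.Str.slice c (some 0) (some 1) = "s" := hk
            simp only [pvBoundsStep, hk', pvUpd, hswx, hswm, hswa, hsws]
            rw [show ((PySem.Dict.mk [("x",px),("m",pm),("a",pa),("s",ps)]).contains "s") = true from rfl]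
            simp only [
              show (('x' == 's') : Bool) = false from rfl,
              show (('m' == 's') : Bool) = false from rfl,
              show (('a' == 's') : Bool) = false from rfl,
              show (('s' == 's') : Bool) = true from rfl,
              eq_self_iff_true, Bool.false_eq_true, if_true, if_false, ite_true, ite_false]
            unfold pvStepV
            split_ifs <;> rfl
          · have h1 : ('x' : Char) ≠ ch := Ne.symm hx
            have h2 : ('m' : Char) ≠ ch := Ne.symm hm
            have h3 : ('a' : Char) ≠ ch := Ne.symm ha
            have h4 : ('s' : Char) ≠ ch := Ne.symm hs
            have hcf : (PySem.Dict.mk [("x",px),("m",pm),("a",pa),("s",ps)]).contains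
                (String.ofList [ch]) = false := by
              rw [pvContains4]; simp [h1, h2, h3, h4]
            simp only [pvBoundsStep, hk, hcf, pvUpd, hswx, hswm, hswa, hsws]
            simp [h1, h2, h3, h4]

lemma pvFold_dict (parts : List String) (px pm pa ps : Int × Int) :
    parts.foldl pvBoundsStep (PySem.Dict.mk [("x", px), ("m", pm), ("a", pa), ("s", ps)])
      = PySem.Dict.mk
          [("x", (parts.filter (fun c => PySem.Str.startswith c "x")).foldl pvStepV px),
           ("m", (parts.filter (fun c => PySem.Str.startswith c "m")).foldl pvStepV pm),
           ("a", (parts.filter (fun c => PySem.Str.startswith c "a")).foldl pvStepV pa),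
           ("s", (parts.filter (fun c => PySem.Str.startswith c "s")).foldl pvStepV ps)] := by
  induction parts generalizing px pm pa ps with
  | nil => rfl
  | cons c parts ih =>
    rw [List.foldl_cons, pvStep_dict, ih]
    by_cases h1 : PySem.Chars.startswith c.toList ['x'] = true <;>
      by_cases h2 : PySem.Chars.startswith c.toList ['m'] = true <;>
        by_cases h3 : PySem.Chars.startswith c.toList ['a'] = true <;>
          by_cases h4 : PySem.Chars.startswith c.toList ['s'] = true <;>
            simp [pvUpd, h1, h2, h3, h4, List.filter_cons, List.foldl_cons]

lemma pvSwap (l : List String) (p : Int × Int) :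
    l.foldl pvStepV p
      = ((l.foldl (fun (st : Int × Int) cond =>
            if PySem.Str.isIn "<" cond then
              (min st.1 (pvParse (pvSplitSnd cond "<")), st.2)
            else if PySem.Str.isIn ">" cond then
              (st.1, max st.2 (pvParse (pvSplitSnd cond ">")))
            else st) (p.2, p.1)).2,
         (l.foldl (fun (st : Int × Int) cond =>
            if PySem.Str.isIn "<" cond then
              (min st.1 (pvParse (pvSplitSnd cond "<")), st.2)
            else if PySem.Str.isIn ">" cond then
              (st.1, max st.2 (pvParse (pvSplitSnd cond ">")))
            else st) (p.2, p.1)).1) := by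
  induction l generalizing p with
  | nil => rfl
  | cons c l ih =>
    simp only [List.foldl_cons]
    rw [ih]
    congr 1 <;> · unfold pvStepV; split_ifs <;> rfl

lemma pvFoldV_eq_reduce (l : List String) :
    l.foldl pvStepV ((1 : Int), (4001 : Int)) = reduce_cond l := by
  rw [pvSwap]
  simp only [reduce_cond, MIN_NUMBER, MAX_NUMBER]
  norm_num

lemma pvPerCond (res : Int) (cond : String) :
    (fun res cond =>
      let x_cond := ((PySem.Str.split? cond ",").getD []).filter (fun c => PySem.Str.startswith c "x")
      let m_cond := ((PySem.Str.split? cond ",").getD []).filter (fun c => PySem.Str.startswith c "m")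
      let a_cond := ((PySem.Str.split? cond ",").getD []).filter (fun c => PySem.Str.startswith c "a")
      let s_cond := ((PySem.Str.split? cond ",").getD []).filter (fun c => PySem.Str.startswith c "s")
      let x := reduce_cond x_cond
      let m := reduce_cond m_cond
      let a := reduce_cond a_cond
      let s := reduce_cond s_cond
      let combinations := ([x, m, a, s]).foldl (fun acc interval => acc * (interval.2 - interval.1)) 1
      res + combinations) res cond
    = (fun res cond =>
      let bounds := ((PySem.Str.split? cond ",").getD []).foldl pvBoundsStep
        (PySem.Dict.ofList [("x", ((1 : Int), (4001 : Int))), ("m", (1, 4001)), ("a", (1, 4001)), ("s", (1, 4001))])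
      let total := bounds.values.foldl (fun acc p => acc * (p.2 - p.1)) 1
      res + total) res cond := by
  beta_reduce
  rw [show PySem.Dict.ofList [("x", ((1 : Int), (4001 : Int))), ("m", (1, 4001)), ("a", (1, 4001)), ("s", (1, 4001))]
        = PySem.Dict.mk [("x", ((1 : Int), (4001 : Int))), ("m", (1, 4001)), ("a", (1, 4001)), ("s", (1, 4001))] from rfl,
      pvFold_dict]
  simp only [PySem.Dict.values_mk, List.map_cons, List.map_nil]
  rw [pvFoldV_eq_reduce, pvFoldV_eq_reduce, pvFoldV_eq_reduce, pvFoldV_eq_reduce]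

-- ===== VERDICT (by name: the statement is the Claim_ definition above) =====
theorem compute_number_of_combinations_spec : Claim_equal_compute_number_of_combinations := by
  intro conditions _ _
  unfold Spec_compute_number_of_combinations compute_number_of_combinations compute_number_of_combinations_alt
  congr 1
  funext res cond
  exact pvPerCond res cond
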